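-- pv_equiv track=rewrite | github.com/blegloannec/cryptopals | 3/3.23.py | inv_opr
-- ===== SOURCE A (Python) =====
-- def get_bit(x,i):
--     return (x>>i)&1 if 0<=i<32 else 0
--
-- def inv_opr(y,a,b):
--     z = 0
--     for i in range(31, -1, -1):
--         if get_bit(b,i):
--             z |= (get_bit(y,i)^get_bit(z,i+a))<<i
--         else:
--             z |= get_bit(y,i)<<i
--     return z
-- ===== SOURCE B (Python) =====
-- def inv_opr(y, a, b):
--     M = 0xFFFFFFFF
--     if a <= 0:
--         return y & M
--     ym = y & M
--     bm = b & M
--     z = ym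
--     for _ in range(31 // a + 1):
--         z = ym ^ ((z >> a) & bm)
--     return z
-- ===== Notes on version B (the rewrite author's own statement) =====
-- stated objective: alternative
-- what changed: B replaces A's 32-iteration bit-by-bit high-to-low scan (with a get_bit helper extracting and reassembling single bits) by the standard whole-word fixed-point untemper: mask y and b to 32 bits and repeat z = y ^ ((z >> a) & b) only ceil(32/a) times, each pass fixing a whole chunk of a bits at once; a <= 0 degenerates to y & 0xFFFFFFFF.
import Mathlib
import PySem

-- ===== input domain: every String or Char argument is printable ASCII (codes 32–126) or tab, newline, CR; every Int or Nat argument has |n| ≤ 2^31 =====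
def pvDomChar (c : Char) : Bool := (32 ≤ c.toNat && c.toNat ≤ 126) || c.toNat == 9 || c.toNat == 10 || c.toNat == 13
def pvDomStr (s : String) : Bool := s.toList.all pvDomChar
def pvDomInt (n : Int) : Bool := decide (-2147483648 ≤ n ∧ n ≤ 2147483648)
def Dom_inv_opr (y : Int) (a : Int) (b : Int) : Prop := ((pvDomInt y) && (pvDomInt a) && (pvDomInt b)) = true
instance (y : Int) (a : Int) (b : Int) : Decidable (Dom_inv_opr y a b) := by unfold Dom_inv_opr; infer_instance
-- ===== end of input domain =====

-- B replaces A's 32-step bit-by-bit scan by the whole-word fixed-point untemper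
-- z := y ^ ((z >> a) & b) iterated 31//a + 1 times on 32-bit-masked words (a ≤ 0: y & 0xFFFFFFFF).

-- ===== PORT A =====
def get_bit (x : Int) (i : Int) : Int :=
  if 0 ≤ i ∧ i < 32 then PySem.Int.band (x >>> i.toNat) 1 else 0

def inv_opr_body (y : Int) (a : Int) (b : Int) (z : Int) (i : Int) : Int :=
  if get_bit b i ≠ 0 then
    PySem.Int.bor z ((PySem.Int.bxor (get_bit y i) (get_bit z (i + a))) <<< i.toNat)
  else
    PySem.Int.bor z ((get_bit y i) <<< i.toNat)

def inv_opr (y : Int) (a : Int) (b : Int) : Int :=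
  (PySem.List.pyRange 31 (-1) (-1)).foldl (inv_opr_body y a b) 0

-- ===== PORT B =====
def inv_opr_alt_step (ym : Int) (bm : Int) (a : Nat) (z : Int) (_ : Nat) : Int :=
  PySem.Int.bxor ym (PySem.Int.band (z >>> a) bm)

def inv_opr_alt (y : Int) (a : Int) (b : Int) : Int :=
  if a ≤ 0 then PySem.Int.band y 4294967295
  else
    let ym := PySem.Int.band y 4294967295
    let bm := PySem.Int.band b 4294967295
    (List.range (PySem.Int.floordiv 31 a + 1).toNat).foldl
      (inv_opr_alt_step ym bm a.toNat) ym

-- ===== PRECONDITION & SPEC =====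
def Spec_inv_opr (y : Int) (a : Int) (b : Int) (out : Int) : Prop := out = inv_opr_alt y a b
instance (y : Int) (a : Int) (b : Int) (out : Int) : Decidable (Spec_inv_opr y a b out) := by unfold Spec_inv_opr; infer_instance

-- ===== CLAIM (what is proved, stated in full; the proofs are below) =====
def Claim_equal_inv_opr : Prop := ∀ (y : Int) (a : Int) (b : Int), Dom_inv_opr y a b → Spec_inv_opr y a b (inv_opr y a b)

-- ===== LEMMAS AND PROOFS =====

def toU (x : Int) : ℕ := (PySem.Int.band x 4294967295).toNat

lemma toU_ofNat (n : ℕ) : toU (Int.ofNat n) = n % 2 ^ 32 := by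
  have hb := PySem.Int.band_natCast n 4294967295
  norm_num at hb
  rw [toU, show Int.ofNat n = (n : Int) from rfl, hb, Int.toNat_natCast,
    show (4294967295 : ℕ) = 2 ^ 32 - 1 from by norm_num, Nat.and_two_pow_sub_one_eq_mod]

lemma toU_negSucc (m : ℕ) : toU (Int.negSucc m) = 2 ^ 32 - 1 - m % 2 ^ 32 := by
  rw [toU, PySem.Int.band]
  have h1 : ¬ (0 ≤ Int.negSucc m) := by simp [Int.negSucc_eq]; omega
  have h2 : (0 : Int) ≤ 4294967295 := by norm_num
  simp only [h1, h2, if_false, if_true]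
  have h3 : (-(Int.negSucc m) - 1).toNat = m := by simp [Int.negSucc_eq]
  rw [h3, show Int.toNat 4294967295 = 4294967295 from rfl, Nat.land_comm,
    show (4294967295 : ℕ) = 2 ^ 32 - 1 from by norm_num, Nat.and_two_pow_sub_one_eq_mod]
  simp

lemma toU_lt (x : Int) : toU x < 2 ^ 32 := by
  cases x with
  | ofNat n => rw [toU_ofNat]; exact Nat.mod_lt _ (by positivity)
  | negSucc m => rw [toU_negSucc]; omega

lemma toU_testBit_of (n i : ℕ) (hi : i < 32) : (toU (Int.ofNat n)).testBit i = n.testBit i := by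
  rw [toU_ofNat, Nat.testBit_mod_two_pow]; simp [hi]

lemma sub_bit (m i : ℕ) (hm : m < 2 ^ 32) (hi : i < 32) :
    (2 ^ 32 - 1 - m).testBit i = !(m.testBit i) := by
  have h2i : (0:ℕ) < 2 ^ i := by positivity
  have hsplit : (2:ℕ) ^ 32 = 2 ^ (32 - i) * 2 ^ i := by rw [← pow_add]; congr 1; omega
  have hA2 : (2:ℕ) ^ (32 - i) = 2 * 2 ^ (32 - i - 1) := by
    rw [← pow_succ']; congr 1; omega
  have hq : m / 2 ^ i < 2 ^ (32 - i) := by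
    rw [Nat.div_lt_iff_lt_mul h2i]; omega
  have hr : m % 2 ^ i < 2 ^ i := Nat.mod_lt _ h2i
  have hdm : 2 ^ i * (m / 2 ^ i) + m % 2 ^ i = m := Nat.div_add_mod m (2 ^ i)
  have e : 2 ^ 32 - 1 - m
      = (2 ^ i - 1 - m % 2 ^ i) + 2 ^ i * (2 ^ (32 - i) - 1 - m / 2 ^ i) := by
    zify [hr.le, Nat.le_sub_one_of_lt hq, Nat.le_sub_one_of_lt hm, Nat.le_sub_one_of_lt hr,
      Nat.one_le_two_pow]
    have hz : ((2:ℤ) ^ i) * (m / 2 ^ i : ℕ) + (m % 2 ^ i : ℕ) = (m : ℤ) := by exact_mod_cast hdm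
    have hz2 : ((2:ℤ) ^ 32) = 2 ^ (32 - i) * 2 ^ i := by exact_mod_cast hsplit
    push_cast
    nlinarith [hz, hz2]
  rw [Nat.testBit_eq_decide_div_mod_eq, Nat.testBit_eq_decide_div_mod_eq, e,
    Nat.add_mul_div_left _ _ h2i, Nat.div_eq_of_lt (by omega), Nat.zero_add]
  have h1 : m / 2 ^ i + 1 ≤ 2 ^ (32 - i) := hq
  by_cases hp : m / 2 ^ i % 2 = 1 <;> simp [hp] <;> omega

lemma toU_testBit_neg (m i : ℕ) (hi : i < 32) : (toU (Int.negSucc m)).testBit i = !(m.testBit i) := by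
  rw [toU_negSucc, sub_bit (m % 2 ^ 32) i (Nat.mod_lt _ (by positivity)) hi,
    Nat.testBit_mod_two_pow]
  simp [hi]

lemma getbit_eq (x : Int) (i : ℕ) (hi : i < 32) :
    get_bit x (↑i) = if (toU x).testBit i then 1 else 0 := by
  have hc : (0 : Int) ≤ ↑i ∧ (↑i : Int) < 32 := by constructor <;> [positivity; exact_mod_cast hi]
  rw [get_bit, if_pos hc, Int.toNat_natCast]
  cases x with
  | ofNat n =>
    rw [show (Int.ofNat n) >>> i = Int.ofNat (n >>> i) from rfl]
    have hb := PySem.Int.band_natCast (n >>> i) 1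
    simp only [Nat.cast_one] at hb
    rw [show Int.ofNat (n >>> i) = ((n >>> i : ℕ) : Int) from rfl, hb]
    have hnat : (n >>> i) &&& 1 = n / 2 ^ i % 2 := by
      rw [Nat.and_one_is_mod, Nat.shiftRight_eq_div_pow]
    rw [toU_testBit_of n i hi, hnat, Nat.testBit_eq_decide_div_mod_eq]
    by_cases hp : n / 2 ^ i % 2 = 1
    · simp [hp]
    · have h0 : n / 2 ^ i % 2 = 0 := by omega
      simp [h0]
  | negSucc m =>
    rw [show (Int.negSucc m) >>> i = Int.negSucc (m >>> i) from rfl]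
    rw [PySem.Int.band]
    have h1 : ¬ (0 ≤ Int.negSucc (m >>> i)) := not_le.mpr (Int.negSucc_lt_zero _)
    have h2 : (0 : Int) ≤ 1 := by norm_num
    simp only [h1, h2, if_false, if_true]
    have h3 : (-(Int.negSucc (m >>> i)) - 1).toNat = m >>> i := by
      generalize m >>> i = k; rw [Int.neg_negSucc]; omega
    have h5 : 1 &&& (m >>> i) = m / 2 ^ i % 2 := by
      rw [Nat.one_and_eq_mod_two, Nat.shiftRight_eq_div_pow]
    rw [h3, toU_testBit_neg m i hi, show Int.toNat 1 = 1 from rfl, h5,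
      Nat.testBit_eq_decide_div_mod_eq]
    by_cases hp : m / 2 ^ i % 2 = 1
    · simp [hp]
    · have h0 : m / 2 ^ i % 2 = 0 := by omega
      simp [h0]

lemma getbit_nat (w : ℕ) (hw : w < 2 ^ 32) (i : ℕ) (hi : i < 32) :
    get_bit (↑w) (↑i) = if w.testBit i then 1 else 0 := by
  rw [show ((w:ℕ):Int) = Int.ofNat w from rfl, getbit_eq _ i hi, toU_testBit_of w i hi]

def fbit (Y Bn aP : ℕ) (j : ℕ) : Bool :=
  if _h : j < 32 then xor (Y.testBit j) (Bn.testBit j && fbit Y Bn aP (j + (aP + 1))) else false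
termination_by 32 - j
decreasing_by omega

lemma fbit_ge (Y Bn aP j : ℕ) (h : 32 ≤ j) : fbit Y Bn aP j = false := by
  rw [fbit]; simp [Nat.not_lt.2 h]

lemma fbit_lt (Y Bn aP j : ℕ) (h : j < 32) :
    fbit Y Bn aP j = xor (Y.testBit j) (Bn.testBit j && fbit Y Bn aP (j + (aP + 1))) := by
  rw [fbit]; simp [h]

def stepN (Y Bn a z : ℕ) : ℕ := Y ^^^ ((z >>> a) &&& Bn)

lemma testBit_ge (z j : ℕ) (hz : z < 2 ^ 32) (hj : 32 ≤ j) : z.testBit j = false :=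
  Nat.testBit_lt_two_pow (lt_of_lt_of_le hz (Nat.pow_le_pow_right (by norm_num) hj))

lemma stepN_lt (Y Bn a z : ℕ) (hY : Y < 2 ^ 32) (hB : Bn < 2 ^ 32) :
    stepN Y Bn a z < 2 ^ 32 := by
  apply Nat.lt_pow_two_of_testBit
  intro j hj
  rw [stepN, Nat.testBit_xor, Nat.testBit_land, testBit_ge Y j hY hj, testBit_ge Bn j hB hj]
  simp

lemma B_inv (Y Bn aP : ℕ) (hY : Y < 2 ^ 32) (hB : Bn < 2 ^ 32) :
    ∀ t : ℕ, (stepN Y Bn (aP + 1))^[t] Y < 2 ^ 32 ∧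
      ∀ j, j < 32 → 32 ≤ j + t * (aP + 1) →
        ((stepN Y Bn (aP + 1))^[t] Y).testBit j = fbit Y Bn aP j := by
  intro t
  induction t with
  | zero => exact ⟨hY, fun j hj h32 => by omega⟩
  | succ t ih =>
    rw [Function.iterate_succ_apply']
    refine ⟨stepN_lt _ _ _ _ hY hB, fun j hj h32 => ?_⟩
    rw [stepN, Nat.testBit_xor, Nat.testBit_land, Nat.testBit_shiftRight]
    rw [fbit_lt Y Bn aP j hj]
    congr 1
    rw [Bool.and_comm]
    congr 1
    rw [show aP + 1 + j = j + (aP + 1) from by omega]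
    by_cases hin : j + (aP + 1) < 32
    · have hexp : (t + 1) * (aP + 1) = t * (aP + 1) + (aP + 1) := by ring
      exact ih.2 _ hin (by omega)
    · rw [fbit_ge _ _ _ _ (by omega), testBit_ge _ _ ih.1 (by omega)]

lemma alt_step_cast (Y Bn a z : ℕ) (k : ℕ) :
    inv_opr_alt_step ↑Y ↑Bn a ↑z k = ↑(stepN Y Bn a z) := by
  rw [inv_opr_alt_step, show ((z:ℕ):Int) >>> a = ((z >>> a : ℕ) : Int) from rfl,
    PySem.Int.band_natCast, PySem.Int.bxor_natCast, stepN]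

lemma alt_fold (Y Bn a : ℕ) : ∀ n : ℕ,
    (List.range n).foldl (inv_opr_alt_step ↑Y ↑Bn a) ↑Y = ↑((stepN Y Bn a)^[n] Y) := by
  intro n
  induction n with
  | zero => rfl
  | succ n ih =>
    rw [List.range_succ, List.foldl_append, ih, List.foldl_cons, List.foldl_nil,
      alt_step_cast, Function.iterate_succ_apply']

lemma getbit_out (x : Int) (i : Int) (h : ¬ (0 ≤ i ∧ i < 32)) : get_bit x i = 0 := by
  simp [get_bit, h]

def descList (n : ℕ) : List Int := (List.range n).reverse.map Int.ofNat

lemma descList_succ (n : ℕ) : descList (n + 1) = Int.ofNat n :: descList n := by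
  simp [descList, List.range_succ]

-- one step of A's loop, on a state whose bits are known
lemma A_step (y a b : Int) (n : ℕ) (hn : n < 32) (w : ℕ) (hw : w < 2 ^ 32)
    (g : ℕ → Bool)
    (hgn : g n = xor ((toU y).testBit n) ((toU b).testBit n &&
      (if h : 0 ≤ (n : ℤ) + a ∧ (n : ℤ) + a < 32 ∧ (n : ℤ) < (n : ℤ) + a
        then g ((n : ℤ) + a).toNat else false)))
    (hinv : ∀ j, w.testBit j = (decide (n + 1 ≤ j ∧ j < 32) && g j)) :
    inv_opr_body y a b ↑w (Int.ofNat n) =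
      ↑(w ||| ((if g n then 1 else 0) <<< n)) := by
  have hcast : (Int.ofNat n) = ((n : ℕ) : Int) := rfl
  have hbB := getbit_eq b n hn
  have hbY := getbit_eq y n hn
  -- the value read back from z
  have hread : get_bit ↑w ((n : ℤ) + a) =
      if (if h : 0 ≤ (n : ℤ) + a ∧ (n : ℤ) + a < 32 ∧ (n : ℤ) < (n : ℤ) + a
        then g ((n : ℤ) + a).toNat else false) then 1 else 0 := by
    by_cases hin : 0 ≤ (n : ℤ) + a ∧ (n : ℤ) + a < 32
    · have hidx : ((n : ℤ) + a) = (((((n : ℤ) + a).toNat : ℕ)) : Int) :=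
        (Int.toNat_of_nonneg hin.1).symm
      have hidx32 : ((n : ℤ) + a).toNat < 32 := by omega
      rw [hidx, getbit_nat w hw _ hidx32, hinv]
      by_cases hlt : (n : ℤ) < (n : ℤ) + a
      · have h1 : n + 1 ≤ ((n : ℤ) + a).toNat := by omega
        simp [hin.1, hin.2, hlt, h1, hidx32]
      · have h1 : ¬ (n + 1 ≤ ((n : ℤ) + a).toNat) := by omega
        simp [hlt, h1]
    · rw [getbit_out _ _ hin]
      have hno : ¬ (0 ≤ (n : ℤ) + a ∧ (n : ℤ) + a < 32 ∧ (n : ℤ) < (n : ℤ) + a) := by tauto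
      rw [dif_neg hno]
      simp
  rw [inv_opr_body, hcast, hbB, hbY, hread]
  have htn : ((n : ℤ)).toNat = n := Int.toNat_natCast n
  have hsh : ∀ c : Bool, ((if c then 1 else 0 : ℤ)) <<< n = ((((if c then 1 else 0 : ℕ)) <<< n : ℕ) : Int) := by
    intro c; cases c <;> rfl
  set R := (if h : 0 ≤ (n : ℤ) + a ∧ (n : ℤ) + a < 32 ∧ (n : ℤ) < (n : ℤ) + a
        then g ((n : ℤ) + a).toNat else false) with hR
  by_cases hbn : (toU b).testBit n
  · have hcond : (if (toU b).testBit n then (1:ℤ) else 0) ≠ 0 := by simp [hbn]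
    rw [if_pos hcond, htn]
    have hx : PySem.Int.bxor (if (toU y).testBit n then (1:ℤ) else 0) (if R then 1 else 0) =
        (if xor ((toU y).testBit n) R then (1:ℤ) else 0) := by
      cases hy : (toU y).testBit n <;> cases hr : R <;> simp [hy, hr] <;> rfl
    rw [hx, hsh, PySem.Int.bor_natCast]
    rw [hgn, hbn]
    simp
  · have hcond : ¬ ((if (toU b).testBit n then (1:ℤ) else 0) ≠ 0) := by simp [hbn]
    rw [if_neg hcond, htn, hsh, PySem.Int.bor_natCast]
    rw [hgn]
    simp [hbn]

lemma or_bit_inv (w n : ℕ) (hn : n < 32) (g : ℕ → Bool)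
    (hinv : ∀ j, w.testBit j = (decide (n + 1 ≤ j ∧ j < 32) && g j)) :
    ∀ j, (w ||| ((if g n then 1 else 0) <<< n)).testBit j = (decide (n ≤ j ∧ j < 32) && g j) := by
  intro j
  rw [Nat.testBit_lor, Nat.testBit_shiftLeft, hinv j]
  rcases lt_trichotomy j n with hj | hj | hj
  · have h1 : ¬ (n + 1 ≤ j ∧ j < 32) := by omega
    have h2 : ¬ (n ≤ j ∧ j < 32) := by omega
    have e1 : decide (n + 1 ≤ j ∧ j < 32) = false := decide_eq_false h1
    have e2 : decide (n ≤ j ∧ j < 32) = false := decide_eq_false h2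
    have e3 : decide (j ≥ n) = false := decide_eq_false (by omega)
    rw [e1, e2, e3]
    simp
  · subst hj
    have h1 : ¬ (j + 1 ≤ j ∧ j < 32) := by omega
    have h2 : j ≤ j ∧ j < 32 := by omega
    have h4 : j - j = 0 := by omega
    cases hg : g j <;> simp [h1, hg, hn, h4]
  · have h1 : (n + 1 ≤ j ∧ j < 32) ↔ (n ≤ j ∧ j < 32) := by omega
    have h2 : (if g n then 1 else 0 : ℕ).testBit (j - n) = false := by
      cases g n
      · simp
      · simp only [if_true]
        exact Nat.testBit_lt_two_pow (by have : j - n ≥ 1 := by omega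
                                         calc (1:ℕ) < 2 ^ 1 := by norm_num
                                         _ ≤ 2 ^ (j - n) := Nat.pow_le_pow_right (by norm_num) this)
    rw [h2]
    simp only [Bool.and_false, Bool.or_false]
    congr 1
    exact decide_eq_decide.mpr h1

lemma A_loop (y a b : Int) (g : ℕ → Bool)
    (hg : ∀ k, k < 32 → g k = xor ((toU y).testBit k) ((toU b).testBit k &&
      (if h : 0 ≤ (k : ℤ) + a ∧ (k : ℤ) + a < 32 ∧ (k : ℤ) < (k : ℤ) + a
        then g ((k : ℤ) + a).toNat else false))) :
    ∀ n, n ≤ 32 → ∀ w : ℕ,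
      (∀ j, w.testBit j = (decide (n ≤ j ∧ j < 32) && g j)) →
      ∃ w' : ℕ, (descList n).foldl (inv_opr_body y a b) ↑w = ↑w' ∧
        ∀ j, w'.testBit j = (decide (j < 32) && g j) := by
  intro n
  induction n with
  | zero =>
    intro _ w hinv
    refine ⟨w, rfl, fun j => ?_⟩
    have h := hinv j
    rw [show (decide (0 ≤ j ∧ j < 32) && g j) = (decide (j < 32) && g j) from by
      congr 1; exact decide_eq_decide.mpr (by omega)] at h
    exact h
  | succ n ih =>
    intro hn w hinv
    have hn32 : n < 32 := by omega
    have hw : w < 2 ^ 32 := by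
      apply Nat.lt_pow_two_of_testBit
      intro j hj
      have hno : ¬ (n + 1 ≤ j ∧ j < 32) := by omega
      rw [hinv j, decide_eq_false hno]
      simp
    rw [descList_succ, List.foldl_cons,
      A_step y a b n hn32 w hw g (hg n hn32) hinv]
    exact ih (by omega) _ (or_bit_inv w n hn32 g hinv)

lemma band_mask_nonneg (x : Int) : 0 ≤ PySem.Int.band x 4294967295 := by
  rw [PySem.Int.band_comm]
  exact PySem.Int.band_nonneg_of_nonneg_left x (by norm_num)

lemma band_mask_eq_toU (x : Int) : PySem.Int.band x 4294967295 = ((toU x : ℕ) : Int) := by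
  have := band_mask_nonneg x
  simp [toU, Int.toNat_of_nonneg this]

lemma pyRange_desc : PySem.List.pyRange 31 (-1) (-1) = descList 32 := by decide

lemma init_inv (g : ℕ → Bool) : ∀ j, (0 : ℕ).testBit j = (decide (32 ≤ j ∧ j < 32) && g j) := by
  intro j
  rw [Nat.zero_testBit, decide_eq_false (by omega : ¬ (32 ≤ j ∧ j < 32))]
  simp

lemma inv_opr_main_eq (y a b : Int) : inv_opr y a b = inv_opr_alt y a b := by
  have hY := toU_lt y
  have hB := toU_lt b
  by_cases ha : a ≤ 0
  · -- a ≤ 0 : both sides are y & 0xFFFFFFFF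
    obtain ⟨w', hfold, hw'⟩ := A_loop y a b (fun k => (toU y).testBit k)
      (by
        intro k hk
        have hno : ¬ (0 ≤ (k : ℤ) + a ∧ (k : ℤ) + a < 32 ∧ (k : ℤ) < (k : ℤ) + a) := by
          rintro ⟨-, -, h3⟩; omega
        rw [dif_neg hno]
        simp) 32 le_rfl 0 (init_inv _)
    have hw'Y : w' = toU y := by
      apply Nat.eq_of_testBit_eq
      intro j
      rw [hw' j]
      by_cases hj : j < 32
      · simp [hj]
      · rw [decide_eq_false hj, testBit_ge _ _ hY (by omega)]
        simp
    rw [inv_opr, pyRange_desc, inv_opr_alt, if_pos ha, band_mask_eq_toU,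
      show ((0:ℤ)) = ((0:ℕ):ℤ) from rfl, hfold, hw'Y]
  · -- a ≥ 1
    have ha1 : 1 ≤ a := by omega
    set aN := a.toNat with haN
    have haNa : (aN : ℤ) = a := Int.toNat_of_nonneg (by omega)
    have haN1 : 1 ≤ aN := by omega
    have hsucc : aN - 1 + 1 = aN := by omega
    set g := fbit (toU y) (toU b) (aN - 1) with hgdef
    have hg : ∀ k, k < 32 → g k = xor ((toU y).testBit k) ((toU b).testBit k &&
        (if h : 0 ≤ (k : ℤ) + a ∧ (k : ℤ) + a < 32 ∧ (k : ℤ) < (k : ℤ) + a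
          then g ((k : ℤ) + a).toNat else false)) := by
      intro k hk
      rw [hgdef, fbit_lt _ _ _ _ hk, hsucc]
      by_cases hin : (k : ℤ) + a < 32
      · have hcond : 0 ≤ (k : ℤ) + a ∧ (k : ℤ) + a < 32 ∧ (k : ℤ) < (k : ℤ) + a := by
          refine ⟨by omega, hin, by omega⟩
        rw [dif_pos hcond, show ((k : ℤ) + a).toNat = k + aN from by omega]
      · rw [dif_neg (by rintro ⟨-, h2, -⟩; omega), fbit_ge _ _ _ (k + aN) (by omega)]
    obtain ⟨w', hfold, hw'⟩ := A_loop y a b g hg 32 le_rfl 0 (init_inv _)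
    -- B side
    have hNval : (PySem.Int.floordiv 31 a + 1).toNat = 31 / aN + 1 := by
      have h2 : Int.fdiv ((31:ℤ)) ((aN:ℕ):ℤ) = ((31 / aN : ℕ) : ℤ) := by
        rw [show (31:ℤ) = ((31:ℕ):ℤ) from rfl]
        exact_mod_cast (Int.ofNat_fdiv 31 aN).symm
      rw [PySem.Int.floordiv, ← haNa, h2]
      generalize (31 / aN : ℕ) = q
      omega
    have hfoldB := alt_fold (toU y) (toU b) aN (31 / aN + 1)
    have hinv := B_inv (toU y) (toU b) (aN - 1) hY hB (31 / aN + 1)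
    rw [hsucc] at hinv
    have hfin : (stepN (toU y) (toU b) aN)^[31 / aN + 1] (toU y) = w' := by
      apply Nat.eq_of_testBit_eq
      intro j
      by_cases hj : j < 32
      · have hdm := Nat.div_add_mod 31 aN
        have hml := Nat.mod_lt 31 (show 0 < aN by omega)
        have hexp : (31 / aN + 1) * aN = aN * (31 / aN) + aN := by ring
        rw [hinv.2 j hj (by omega), hw' j, decide_eq_true hj]
        simp [hgdef]
      · rw [testBit_ge _ _ hinv.1 (by omega), hw' j, decide_eq_false hj]
        simp
    rw [inv_opr, pyRange_desc, show ((0:ℤ)) = ((0:ℕ):ℤ) from rfl, hfold,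
      inv_opr_alt, if_neg ha]
    simp only [band_mask_eq_toU, hNval, ← haN]
    rw [hfoldB, hfin]

-- ===== VERDICT (by name: the statement is the Claim_ definition above) =====
theorem inv_opr_spec : Claim_equal_inv_opr := by
  intro y a b _
  exact inv_opr_main_eq y a b
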